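-- pv_equiv track=rewrite | github.com/peejh/coding-practice | HackerRank/Problem Solving/algorithms/implement_electronicsShop.py | getMoneySpent_bruteForce
-- ===== SOURCE A (Python) =====
-- def getMoneySpent_bruteForce(keyboards, drives, b):
--     sums = []
--     for k in keyboards:
--         for d in drives:
--             cost = k + d
--             if cost <= b:
--                 sums.append(cost)
--
--     return max([-1, *sums])
-- ===== SOURCE B (Python) =====
-- def getMoneySpent_bruteForce(keyboards, drives, b):
--     ds = sorted(drives)
--     best = -1
--     for k in keyboards:
--         x = b - k
--         # rightmost insertion point: number of drives <= x
--         lo, hi = 0, len(ds)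
--         while lo < hi:
--             mid = (lo + hi) // 2
--             if ds[mid] <= x:
--                 lo = mid + 1
--             else:
--                 hi = mid
--         if lo > 0:
--             c = k + ds[lo - 1]
--             if c > best:
--                 best = c
--     return best
-- ===== Notes on version B (the rewrite author's own statement) =====
-- stated objective: faster
-- what changed: Instead of enumerating all keyboard-drive pair sums into a list and taking its max, B sorts the drives once and for each keyboard binary-searches the most expensive affordable drive, keeping a running best.
import Mathlib
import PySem

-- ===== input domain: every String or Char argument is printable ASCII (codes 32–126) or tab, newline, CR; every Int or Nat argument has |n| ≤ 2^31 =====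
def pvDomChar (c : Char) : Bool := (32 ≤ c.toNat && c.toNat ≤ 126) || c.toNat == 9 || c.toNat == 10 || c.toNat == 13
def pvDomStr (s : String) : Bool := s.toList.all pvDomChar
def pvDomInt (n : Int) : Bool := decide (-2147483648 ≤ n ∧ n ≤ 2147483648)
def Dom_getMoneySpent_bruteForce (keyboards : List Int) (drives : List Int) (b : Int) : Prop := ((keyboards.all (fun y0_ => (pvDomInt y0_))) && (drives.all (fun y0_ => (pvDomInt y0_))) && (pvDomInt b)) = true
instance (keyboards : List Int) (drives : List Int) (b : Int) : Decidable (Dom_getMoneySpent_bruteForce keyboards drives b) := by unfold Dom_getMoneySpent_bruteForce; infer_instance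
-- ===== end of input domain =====

-- B replaces A's enumeration of all keyboard+drive pair sums by sorting the drives once and
-- binary-searching, per keyboard, the most expensive affordable drive (objective: faster).

-- ===== PORT A =====
def getMoneySpent_bruteForce (keyboards : List Int) (drives : List Int) (b : Int) : Int :=
  let sums := keyboards.foldl (fun acc k =>
    drives.foldl (fun acc2 d =>
      let cost := k + d
      if cost ≤ b then acc2 ++ [cost] else acc2) acc) []
  (PySem.List.max? ((-1) :: sums) (fun y => y)).getD (-1)  -- max of a nonempty list: getD never fires

-- ===== PORT B =====
-- the while-loop binary search of Source B (lo, hi with mid = (lo+hi)//2)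
def pvBsLoop (ds : List Int) (x : Int) (lo hi : Int) : Int :=
  if h : lo < hi then
    if PySem.List.pyGetD ds (PySem.Int.floordiv (lo + hi) 2) 0 ≤ x then
      pvBsLoop ds x (PySem.Int.floordiv (lo + hi) 2 + 1) hi
    else
      pvBsLoop ds x lo (PySem.Int.floordiv (lo + hi) 2)
  else lo
termination_by (hi - lo).toNat
decreasing_by
  · have h1 := PySem.Int.floordiv_two_mid_bounds (le_of_lt h)
    omega
  · have h2 : PySem.Int.floordiv (lo + hi) 2 < hi := by
      rw [PySem.Int.floordiv_lt_iff_lt_mul (by omega)]; omega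
    omega

def getMoneySpent_bruteForce_alt (keyboards : List Int) (drives : List Int) (b : Int) : Int :=
  let ds := PySem.List.sorted drives (fun d => d)
  keyboards.foldl (fun best k =>
    let x := b - k
    let lo := pvBsLoop ds x 0 (ds.length : Int)
    if lo > 0 then
      let c := k + PySem.List.pyGetD ds (lo - 1) 0
      if c > best then c else best
    else best) (-1)

-- ===== PRECONDITION & SPEC =====
def Spec_getMoneySpent_bruteForce (keyboards : List Int) (drives : List Int) (b : Int) (out : Int) : Prop := out = getMoneySpent_bruteForce_alt keyboards drives b
instance (keyboards : List Int) (drives : List Int) (b : Int) (out : Int) : Decidable (Spec_getMoneySpent_bruteForce keyboards drives b out) := by unfold Spec_getMoneySpent_bruteForce; infer_instance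

-- ===== CLAIM (what is proved, stated in full; the proofs are below) =====
def Claim_equal_getMoneySpent_bruteForce : Prop := ∀ (keyboards : List Int) (drives : List Int) (b : Int), Dom_getMoneySpent_bruteForce keyboards drives b → Spec_getMoneySpent_bruteForce keyboards drives b (getMoneySpent_bruteForce keyboards drives b)

-- ===== LEMMAS AND PROOFS =====

-- binary-search loop invariant: the result r separates the (sorted) list into a prefix ≤ x and a suffix > x
theorem pvBsLoop_spec (ds : List Int) (x : Int) (hs : List.Pairwise (· ≤ ·) ds) :
    ∀ (n : Nat) (lo hi : Int), (hi - lo).toNat = n → 0 ≤ lo → lo ≤ hi → hi ≤ (ds.length : Int) →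
    (∀ (j : Nat) (hj : j < ds.length), (j : Int) < lo → ds[j] ≤ x) →
    (∀ (j : Nat) (hj : j < ds.length), hi ≤ (j : Int) → x < ds[j]) →
    0 ≤ pvBsLoop ds x lo hi ∧ pvBsLoop ds x lo hi ≤ (ds.length : Int) ∧
    (∀ (j : Nat) (hj : j < ds.length), (j : Int) < pvBsLoop ds x lo hi → ds[j] ≤ x) ∧
    (∀ (j : Nat) (hj : j < ds.length), pvBsLoop ds x lo hi ≤ (j : Int) → x < ds[j]) := by
  intro n
  induction n using Nat.strong_induction_on with
  | _ n ih =>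
    intro lo hi hn h0 hlh hhl Hlo Hhi
    rw [pvBsLoop]
    by_cases h : lo < hi
    · have hmb := PySem.Int.floordiv_two_mid_bounds (le_of_lt h)
      have hmlt : PySem.Int.floordiv (lo + hi) 2 < hi := by
        rw [PySem.Int.floordiv_lt_iff_lt_mul (by omega)]; omega
      set mid := PySem.Int.floordiv (lo + hi) 2 with hmid
      have hmidlen : mid < (ds.length : Int) := by omega
      have hmid0 : 0 ≤ mid := by omega
      have hget : PySem.List.pyGetD ds mid 0 = ds[mid.toNat]'(by omega) :=
        PySem.List.pyGetD_eq_getElem ds 0 hmid0 hmidlen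
      have hmono := List.pairwise_iff_getElem.mp hs
      simp only [h, dif_pos, hget]
      by_cases hc : ds[mid.toNat]'(by omega) ≤ x
      · simp only [hc, if_pos]
        refine ih (hi - (mid + 1)).toNat (by omega) (mid + 1) hi (rfl) (by omega) (by omega) hhl
          ?_ Hhi
        intro j hj hjlt
        rcases lt_or_ge (j : Int) (mid : Int) with hlt | hge
        · calc ds[j] ≤ ds[mid.toNat]'(by omega) := hmono j mid.toNat hj (by omega) (by omega)
            _ ≤ x := hc
        · have : j = mid.toNat := by omega
          subst this; exact hc
      · simp only [hc, if_neg, not_false_iff]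
        refine ih (mid - lo).toNat (by omega) lo mid (rfl) (by omega) (by omega) (by omega)
          Hlo ?_
        intro j hj hge
        rcases lt_or_ge (mid : Int) (j : Int) with hlt | hge2
        · have := hmono mid.toNat j (by omega) hj (by omega)
          omega
        · have : j = mid.toNat := by omega
          subst this; omega
    · simp only [h, dif_neg, not_false_iff]
      have : lo = hi := by omega
      subst this
      exact ⟨h0, hhl, Hlo, Hhi⟩

-- final form of the search: pvBsLoop from [0, len) computes the count boundary
theorem pvBs_spec (ds : List Int) (x : Int) (hs : List.Pairwise (· ≤ ·) ds) :
    0 ≤ pvBsLoop ds x 0 (ds.length : Int) ∧ pvBsLoop ds x 0 (ds.length : Int) ≤ (ds.length : Int) ∧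
    (∀ (j : Nat) (hj : j < ds.length), (j : Int) < pvBsLoop ds x 0 (ds.length : Int) → ds[j] ≤ x) ∧
    (∀ (j : Nat) (hj : j < ds.length), pvBsLoop ds x 0 (ds.length : Int) ≤ (j : Int) → x < ds[j]) := by
  exact pvBsLoop_spec ds x hs (((ds.length : Int) - 0).toNat) 0 (ds.length : Int) rfl (by omega)
    (by omega) (by omega) (fun j hj h => by omega) (fun j hj h => by omega)

-- running max over a list whose maximum element is m
theorem pvFoldlMaxLe (t : List Int) : ∀ (c : Int), (∀ y ∈ t, y ≤ c) → t.foldl max c = c := by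
  induction t with
  | nil => intro c _; rfl
  | cons a t ih =>
    intro c h
    simp only [List.foldl_cons]
    rw [max_eq_left (h a (by simp))]
    exact ih c (fun y hy => h y (by simp [hy]))

theorem pvFoldlMaxTop (l : List Int) : ∀ (acc m : Int), m ∈ l → (∀ y ∈ l, y ≤ m) →
    l.foldl max acc = max acc m := by
  induction l with
  | nil => intro _ _ h; exact absurd h (by simp)
  | cons a t ih =>
    intro acc m hm hmax
    simp only [List.foldl_cons]
    by_cases ht : m ∈ t
    · rw [ih (max acc a) m ht (fun y hy => hmax y (by simp [hy])), max_assoc,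
        max_eq_right (hmax a (by simp))]
    · have hma : m = a := (List.mem_cons.mp hm).resolve_right ht
      subst hma
      rw [pvFoldlMaxLe t (max acc m) (fun y hy => le_trans (hmax y (by simp [hy])) (le_max_right _ _))]

-- A's result as a nested running-max fold over keyboards and drives
theorem pvA_eq (keyboards drives : List Int) (b : Int) :
    getMoneySpent_bruteForce keyboards drives b =
    keyboards.foldl (fun acc k =>
      ((drives.filter (fun d => decide (k + d ≤ b))).map (fun d => k + d)).foldl max acc) (-1) := by
  unfold getMoneySpent_bruteForce
  have hinner : ∀ (k : Int) (acc2 : List Int),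
      drives.foldl (fun a d => let cost := k + d; if cost ≤ b then a ++ [cost] else a) acc2 =
      acc2 ++ (drives.filter (fun d => decide (k + d ≤ b))).map (fun d => k + d) := by
    intro k acc2
    have h := PySem.List.foldl_append_if (fun d => decide (k + d ≤ b)) (fun d => k + d) drives acc2
    simpa using h
  have hsums : ∀ (ks : List Int) (acc : List Int),
      ks.foldl (fun acc k => drives.foldl (fun acc2 d =>
        let cost := k + d; if cost ≤ b then acc2 ++ [cost] else acc2) acc) acc =
      acc ++ ks.flatMap (fun k => (drives.filter (fun d => decide (k + d ≤ b))).map (fun d => k + d)) := by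
    intro ks
    induction ks with
    | nil => intro acc; simp
    | cons a t iht =>
      intro acc
      rw [List.foldl_cons, hinner a acc, iht, List.flatMap_cons, List.append_assoc]
  simp only [hsums, List.nil_append, PySem.List.max?_id_cons, Option.getD_some, List.foldl_flatMap]

-- per-keyboard bridge: the running max over affordable sums for k equals B's step
theorem pvStep_eq (drives : List Int) (b k acc : Int) :
    ((drives.filter (fun d => decide (k + d ≤ b))).map (fun d => k + d)).foldl max acc =
    (let ds := PySem.List.sorted drives (fun d => d)
     let x := b - k
     let lo := pvBsLoop ds x 0 (ds.length : Int)
     if lo > 0 then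
       let c := k + PySem.List.pyGetD ds (lo - 1) 0
       if c > acc then c else acc
     else acc) := by
  dsimp only
  have hs : List.Pairwise (· ≤ ·) (PySem.List.sorted drives (fun d => d)) :=
    PySem.List.sorted_pairwise drives (fun d => d)
  set ds := PySem.List.sorted drives (fun d => d) with hds
  set x := b - k with hx
  obtain ⟨hr0, hrlen, Hle, Hgt⟩ := pvBs_spec ds x hs
  set r := pvBsLoop ds x 0 (ds.length : Int) with hrdef
  by_cases hpos : r > 0
  · have hidx : (r - 1).toNat < ds.length := by omega
    have hget : PySem.List.pyGetD ds (r - 1) 0 = ds[(r - 1).toNat] :=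
      PySem.List.pyGetD_eq_getElem ds 0 (by omega) (by omega)
    set m := ds[(r - 1).toNat] with hm
    have hmono := List.pairwise_iff_getElem.mp hs
    have hmx : m ≤ x := Hle (r - 1).toNat hidx (by omega)
    have hmemds : m ∈ ds := List.getElem_mem hidx
    have hmem : m ∈ drives := (PySem.List.mem_sorted drives (fun d => d) false m).mp hmemds
    have hmemF : k + m ∈ (drives.filter (fun d => decide (k + d ≤ b))).map (fun d => k + d) := by
      refine List.mem_map.mpr ⟨m, List.mem_filter.mpr ⟨hmem, by simp; omega⟩, rfl⟩
    have hmax : ∀ y ∈ (drives.filter (fun d => decide (k + d ≤ b))).map (fun d => k + d), y ≤ k + m := by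
      intro y hy
      obtain ⟨d, hdf, rfl⟩ := List.mem_map.mp hy
      obtain ⟨hdmem, hdle⟩ := List.mem_filter.mp hdf
      have hdle' : d ≤ x := by simp at hdle; omega
      have hdds : d ∈ ds := (PySem.List.mem_sorted drives (fun d => d) false d).mpr hdmem
      obtain ⟨j, hj, hdj⟩ := List.mem_iff_getElem.mp hdds
      rcases lt_or_ge (j : Int) r with hlt | hge
      · rcases Nat.lt_or_ge j (r - 1).toNat with hj2 | hj2
        · have := hmono j (r - 1).toNat hj hidx hj2
          omega
        · have : j = (r - 1).toNat := by omega
          subst this; omega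
      · have := Hgt j hj hge
        omega
    rw [pvFoldlMaxTop _ acc (k + m) hmemF hmax]
    simp only [hpos, if_pos, hget, gt_iff_lt, max_def]
    split_ifs <;> omega
  · have hfilt : drives.filter (fun d => decide (k + d ≤ b)) = [] := by
      rw [List.filter_eq_nil_iff]
      intro d hd
      have hdds : d ∈ ds := (PySem.List.mem_sorted drives (fun d => d) false d).mpr hd
      obtain ⟨j, hj, hdj⟩ := List.mem_iff_getElem.mp hdds
      have := Hgt j hj (by omega)
      simp
      omega
    simp [hfilt, hpos]

-- ===== VERDICT (by name: the statement is the Claim_ definition above) =====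
theorem getMoneySpent_bruteForce_spec : Claim_equal_getMoneySpent_bruteForce := by
  intro keyboards drives b _
  unfold Spec_getMoneySpent_bruteForce getMoneySpent_bruteForce_alt
  rw [pvA_eq]
  exact PySem.List.foldl_congr_mem _ _ _ _ (fun acc k _ => pvStep_eq drives b k acc)
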